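-- pv_equiv track=rewrite | github.com/Gaucho98/more-random-exercises | TP1 IDs&Tuplas/TP1 Tuplas ej 7.py | calculo_area
-- ===== SOURCE A (Python) =====
-- def calculo_area(lista):
--     lista2 = []
--     for i in range(len(lista)):
--         tuplaAlista = list(lista[i])
--         lista2.append(tuplaAlista)
--
--     lista3 = []
--     for i in range(len(lista2)):
--         for j in range(len(lista2[i])):
--             suma = sum(lista2[i][1])
--         lista3.append(suma)
--
--     lista4 = []
--     for i in range(len(lista2)):
--         lista = []
--         lista.append(lista2[i][0])
--         lista.append(lista3[i])
--         lista4.append(lista)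
--
--     lista5 = []
--     for i in range(len(lista4)):
--         listaAtupla = tuple(lista4[i])
--         lista5.append(listaAtupla)
--     return lista5
-- ===== SOURCE B (Python) =====
-- def calculo_area(lista):
--     return [(t[0], sum(t[1])) for t in lista]
-- ===== Notes on version B (the rewrite author's own statement) =====
-- stated objective: simpler
-- what changed: Replaced A's four sequential passes (tuple-to-list conversion, nested per-element summing loop with leftover state, list reassembly, list-to-tuple conversion) with a single comprehension emitting (name, sum) directly.
import Mathlib
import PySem

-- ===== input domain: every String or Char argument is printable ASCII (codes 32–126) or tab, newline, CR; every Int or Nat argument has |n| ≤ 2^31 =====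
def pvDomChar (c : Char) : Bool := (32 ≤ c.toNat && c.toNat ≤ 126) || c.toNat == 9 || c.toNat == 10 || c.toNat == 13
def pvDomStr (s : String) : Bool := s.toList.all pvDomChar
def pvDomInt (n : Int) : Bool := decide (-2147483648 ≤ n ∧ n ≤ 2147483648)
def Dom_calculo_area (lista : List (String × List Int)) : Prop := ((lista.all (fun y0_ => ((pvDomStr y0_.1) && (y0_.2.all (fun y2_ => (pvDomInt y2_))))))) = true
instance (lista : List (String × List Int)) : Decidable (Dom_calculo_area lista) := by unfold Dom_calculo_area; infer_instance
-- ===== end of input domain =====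

-- B replaces A's four sequential index-loop passes with one direct comprehension; objective: simpler.

-- ===== PORT A =====
-- Literal port of A's four passes, one helper per pass. Each (name, nums) tuple has
-- len 2 (tuple↔list conversion is the identity on these pairs), so the inner
-- 'for j in range(len(lista2[i]))' always iterates over range(0,2) and Python's
-- persistent 'suma' variable is always assigned before use; the pass-2 fold state
-- carries it (initialised 0, never read before being set).

-- pass 1: lista2: for i in range(len(lista)): lista2.append(list(lista[i]))
def calcA_pass1 (lista : List (String × List Int)) : List (String × List Int) :=
  (PySem.List.pyRange 0 (PySem.List.len lista)).foldl
    (fun acc i => acc ++ [PySem.List.pyGetD lista i ("", [])]) []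

-- pass 2: lista3: nested loop; for j in range(len(lista2[i])) [= range(0,2)]: suma = sum(lista2[i][1])
def calcA_pass2 (lista2 : List (String × List Int)) : List Int :=
  ((PySem.List.pyRange 0 (PySem.List.len lista2)).foldl
    (fun (st : Int × List Int) i =>
      let suma := (PySem.List.pyRange 0 2).foldl
        (fun _ _ => (PySem.List.pyGetD lista2 i ("", [])).2.sum) st.1
      (suma, st.2 ++ [suma])) (0, [])).2

-- pass 3: lista4: for i in range(len(lista2)): append [lista2[i][0], lista3[i]]
def calcA_pass3 (lista2 : List (String × List Int)) (lista3 : List Int) : List (String × Int) :=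
  (PySem.List.pyRange 0 (PySem.List.len lista2)).foldl
    (fun acc i => acc ++ [((PySem.List.pyGetD lista2 i ("", [])).1,
                           PySem.List.pyGetD lista3 i 0)]) []

-- pass 4: lista5: for i in range(len(lista4)): append tuple(lista4[i])
def calcA_pass4 (lista4 : List (String × Int)) : List (String × Int) :=
  (PySem.List.pyRange 0 (PySem.List.len lista4)).foldl
    (fun acc i => acc ++ [PySem.List.pyGetD lista4 i ("", 0)]) []

def calculo_area (lista : List (String × List Int)) : List (String × Int) :=
  let lista2 := calcA_pass1 lista
  let lista3 := calcA_pass2 lista2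
  let lista4 := calcA_pass3 lista2 lista3
  calcA_pass4 lista4

-- ===== PORT B =====
-- [(t[0], sum(t[1])) for t in lista]
def calculo_area_alt (lista : List (String × List Int)) : List (String × Int) :=
  lista.map (fun t => (t.1, t.2.sum))

-- ===== PRECONDITION & SPEC =====
def Spec_calculo_area (lista : List (String × List Int)) (out : List (String × Int)) : Prop := out = calculo_area_alt lista
instance (lista : List (String × List Int)) (out : List (String × Int)) : Decidable (Spec_calculo_area lista out) := by unfold Spec_calculo_area; infer_instance

-- ===== CLAIM (what is proved, stated in full; the proofs are below) =====
def Claim_equal_calculo_area : Prop := ∀ (lista : List (String × List Int)), Dom_calculo_area lista → Spec_calculo_area lista (calculo_area lista)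

-- ===== LEMMAS AND PROOFS =====

-- an indexing pass 'acc ++ [f(xs[i])] for i in range(len(xs))' read as a map produces xs.map f
theorem pv_map_index {α β : Type} (xs : List α) (f : α → β) (d : α) :
    (PySem.List.pyRange 0 (PySem.List.len xs)).map (fun i => f (PySem.List.pyGetD xs i d))
      = xs.map f := by
  have h : (fun i => f (PySem.List.pyGetD xs i d))
      = f ∘ (fun i => PySem.List.pyGetD xs i d) := rfl
  rw [h, ← List.map_map, PySem.List.map_pyGetD_pyRange_zero]

-- the suma-carrying fold of pass 2 appends g i at each index, whatever the carried suma is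
theorem pv_suma_fold (l : List Int) (g : Int → Int) (s : Int) (acc : List Int) :
    (l.foldl (fun (st : Int × List Int) i => (g i, st.2 ++ [g i])) (s, acc)).2
      = acc ++ l.map g := by
  induction l generalizing s acc with
  | nil => simp
  | cons x t ih => simp [List.foldl_cons, ih]

theorem calcA_pass1_eq (lista : List (String × List Int)) : calcA_pass1 lista = lista := by
  unfold calcA_pass1
  rw [PySem.List.foldl_append_singleton_eq_map]
  simpa using pv_map_index lista id ("", [])

theorem calcA_pass2_eq (xs : List (String × List Int)) :
    calcA_pass2 xs = xs.map (fun t => t.2.sum) := by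
  unfold calcA_pass2
  have hrng : PySem.List.pyRange 0 2 = [0, 1] := by decide
  simp only [hrng, List.foldl_cons, List.foldl_nil]
  rw [pv_suma_fold (PySem.List.pyRange 0 (PySem.List.len xs))
        (fun i => (PySem.List.pyGetD xs i ("", [])).2.sum) 0 [],
      List.nil_append,
      pv_map_index xs (fun t => t.2.sum) ("", [])]

theorem calcA_pass3_eq (xs : List (String × List Int)) :
    calcA_pass3 xs (xs.map (fun t => t.2.sum))
      = xs.map (fun t => (t.1, t.2.sum)) := by
  unfold calcA_pass3
  rw [PySem.List.foldl_append_singleton_eq_map, List.nil_append]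
  have hget : (fun i => ((PySem.List.pyGetD xs i ("", [])).1,
        PySem.List.pyGetD (xs.map (fun t => t.2.sum)) i 0))
      = (fun i => ((fun t : String × List Int => (t.1, t.2.sum))
          (PySem.List.pyGetD xs i ("", [])))) := by
    funext i
    have := PySem.List.pyGetD_map (f := fun t : String × List Int => t.2.sum)
      (xs := xs) (i := i) (d := ("", []))
    simp_all
  rw [hget, pv_map_index xs (fun t => (t.1, t.2.sum)) ("", [])]

theorem calcA_pass4_eq (xs : List (String × Int)) : calcA_pass4 xs = xs := by
  unfold calcA_pass4
  rw [PySem.List.foldl_append_singleton_eq_map]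
  simpa using pv_map_index xs id ("", 0)

-- ===== VERDICT (by name: the statement is the Claim_ definition above) =====
theorem calculo_area_spec : Claim_equal_calculo_area := by
  intro lista _
  show calculo_area lista = calculo_area_alt lista
  rw [calculo_area, calcA_pass1_eq, calcA_pass2_eq, calcA_pass3_eq, calcA_pass4_eq,
      calculo_area_alt]
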